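-- pv_equiv track=rewrite | github.com/Rene7e7/ReneTubiera-asixc1B-m03 | proves/UF3 Recu/A1. Fitxers E_S Exercici Reforç Se debe hacer asi/Exercicis de Contar/Agrupar palabras por longitud y ordenar por frecuencia/agrupar_y_ordenar_palabras.py | agrupar_y_ordenar_palabras
-- ===== SOURCE A (Python) =====
-- from collections import defaultdict, Counter
--
-- def agrupar_y_ordenar_palabras(palabras):
--     grupos = defaultdict(list)
--     for palabra in palabras:
--         grupos[len(palabra)].append(palabra)
--
--     for longitud in grupos:
--         contador = Counter(grupos[longitud])
--         grupos[longitud] = sorted(contador.items(), key=lambda x: (-x[1], x[0]))  # Ordenar por frecuencia y luego alfabéticamente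
--
--     return grupos
-- ===== SOURCE B (Python) =====
-- from collections import Counter
--
-- def agrupar_y_ordenar_palabras(palabras):
--     # One global sort of the unique (word, freq) pairs; distributing the sorted
--     # list into length buckets keeps each bucket sorted (stable bucketing),
--     # so no per-group sort is ever performed.
--     orden = sorted(Counter(palabras).items(), key=lambda x: (-x[1], x[0]))
--     grupos = {len(p): [] for p in palabras}
--     for par in orden:
--         grupos[len(par[0])].append(par)
--     return grupos
-- ===== Notes on version B (the rewrite author's own statement) =====
-- stated objective: alternative
-- what changed: B performs ONE global sort of the unique (word, freq) pairs by (-freq, word) and then distributes that sorted list into pre-created length buckets in a single stable pass, so no per-group Counter and no per-group sort exist at all (correctness: stable bucketing of a sorted list leaves every bucket sorted).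
import Mathlib
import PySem

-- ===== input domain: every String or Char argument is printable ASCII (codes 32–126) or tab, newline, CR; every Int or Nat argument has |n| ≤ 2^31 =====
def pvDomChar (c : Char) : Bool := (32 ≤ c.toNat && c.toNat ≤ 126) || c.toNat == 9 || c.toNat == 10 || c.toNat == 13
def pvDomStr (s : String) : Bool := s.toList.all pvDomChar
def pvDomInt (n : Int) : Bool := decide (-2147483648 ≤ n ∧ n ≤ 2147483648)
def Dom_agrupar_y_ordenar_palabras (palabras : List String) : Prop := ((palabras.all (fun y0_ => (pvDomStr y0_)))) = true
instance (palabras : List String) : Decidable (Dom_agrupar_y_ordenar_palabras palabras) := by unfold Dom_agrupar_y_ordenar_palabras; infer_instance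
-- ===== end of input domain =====

-- B sorts the unique (word, freq) pairs ONCE globally by (-freq, word) and distributes that
-- sorted list into pre-created length buckets in one stable pass, so it has no per-group
-- Counter and no per-group sort (objective: alternative algorithm, similar cost).

-- ===== PORT A =====
-- grupos = defaultdict(list); for palabra in palabras: grupos[len(palabra)].append(palabra)
-- for longitud in grupos: grupos[longitud] = sorted(Counter(grupos[longitud]).items(), key=lambda x: (-x[1], x[0]))
def agrupar_y_ordenar_palabras (palabras : List String) : List (Int × List (String × Int)) :=
  ((palabras.foldl
      (fun d p => d.modify (PySem.Str.len p) [] (fun g => g ++ [p]))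
      (PySem.Dict.mk [])).items.map (fun q =>
    (q.1, PySem.List.sorted2 (PySem.Dict.counter q.2).items (fun x => -x.2) (fun x => x.1))))

-- ===== PORT B =====
-- orden = sorted(Counter(palabras).items(), key=lambda x: (-x[1], x[0]))
-- grupos = {len(p): [] for p in palabras}
-- for par in orden: grupos[len(par[0])].append(par)      (the key is always present)
def agrupar_y_ordenar_palabras_alt (palabras : List String) : List (Int × List (String × Int)) :=
  let orden := PySem.List.sorted2 (PySem.Dict.counter palabras).items (fun x => -x.2) (fun x => x.1)
  let grupos := palabras.foldl
      (fun d p => d.insert (PySem.Str.len p) ([] : List (String × Int))) (PySem.Dict.mk [])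
  (orden.foldl (fun d par => d.modify (PySem.Str.len par.1) [] (fun g => g ++ [par])) grupos).items

-- ===== PRECONDITION & SPEC =====
def Spec_agrupar_y_ordenar_palabras (palabras : List String) (out : List (Int × List (String × Int))) : Prop := out = agrupar_y_ordenar_palabras_alt palabras
instance (palabras : List String) (out : List (Int × List (String × Int))) : Decidable (Spec_agrupar_y_ordenar_palabras palabras out) := by unfold Spec_agrupar_y_ordenar_palabras; infer_instance

-- ===== CLAIM (what is proved, stated in full; the proofs are below) =====
def Claim_equal_agrupar_y_ordenar_palabras : Prop := ∀ (palabras : List String), Dom_agrupar_y_ordenar_palabras palabras → Spec_agrupar_y_ordenar_palabras palabras (agrupar_y_ordenar_palabras palabras)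

-- ===== LEMMAS AND PROOFS =====

-- items of the "group values by key" fold from the empty dict (A's first loop)
theorem pv_groupby_items {κ ν β : Type} [BEq κ] [LawfulBEq κ] (l : List β) (key : β → κ) (val : β → ν) :
    (l.foldl (fun d x => d.modify (key x) [] (fun g => g ++ [val x]))
      (PySem.Dict.mk ([] : List (κ × List ν)))).items
    = (PySem.Set.ofList (l.map key)).map
        (fun c => (c, (l.filter (fun x => key x == c)).map val)) := by
  have hkeys : (l.foldl (fun d x => d.modify (key x) [] (fun g => g ++ [val x]))
      (PySem.Dict.mk ([] : List (κ × List ν)))).keys = PySem.Set.ofList (l.map key) := by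
    have h := PySem.Dict.keys_foldl_modify_key l key ([] : List ν)
      (fun _ x => fun g => g ++ [val x]) (PySem.Dict.mk [])
    simpa [PySem.Dict.keys, PySem.Set.update, PySem.Set.ofList, PySem.Set.empty] using h
  have hnodup : (l.foldl (fun d x => d.modify (key x) [] (fun g => g ++ [val x]))
      (PySem.Dict.mk ([] : List (κ × List ν)))).keys.Nodup := by
    rw [hkeys]; exact PySem.Set.nodup_ofList _
  have hgetD : ∀ c, (l.foldl (fun d x => d.modify (key x) [] (fun g => g ++ [val x]))
      (PySem.Dict.mk ([] : List (κ × List ν)))).getD c []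
      = (l.filter (fun x => key x == c)).map val := by
    intro c
    have h1 : (l.foldl (fun d x => d.modify (key x) [] (fun g => g ++ [val x]))
        (PySem.Dict.mk ([] : List (κ × List ν))))
        = ((l.map (fun x => (key x, val x))).foldl
            (fun d p => d.modify p.1 [] (fun g => g ++ [p.2])) (PySem.Dict.mk [])) := by
      rw [List.foldl_map]
    rw [h1, PySem.Dict.getD_foldl_modify_append]
    simp [PySem.Dict.getD, PySem.Dict.get?, List.filter_map, Function.comp_def]
  rw [PySem.Dict.items_eq_map_keys _ hnodup [], hkeys]
  exact List.map_congr_left (fun c _ => by rw [hgetD c])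

-- Set.add on an already-present / absent element
theorem pv_add_of_mem {α : Type} [BEq α] [LawfulBEq α] (s : PySem.Set α) (x : α) (hx : x ∈ s) :
    PySem.Set.add s x = s := by
  simp [PySem.Set.add, PySem.Set.contains, hx]

theorem pv_add_of_not_mem {α : Type} [BEq α] [LawfulBEq α] (s : PySem.Set α) (x : α) (hx : x ∉ s) :
    PySem.Set.add s x = s ++ [x] := by
  simp [PySem.Set.add, PySem.Set.contains, hx]

-- Set.add commutes with filter
theorem pv_filter_add {α : Type} [BEq α] [LawfulBEq α] (p : α → Bool) (s : PySem.Set α) (x : α) :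
    (PySem.Set.add s x).filter p = if p x then PySem.Set.add (s.filter p) x else s.filter p := by
  by_cases hx : x ∈ s
  · rw [pv_add_of_mem s x hx]
    by_cases hpx : p x
    · rw [if_pos hpx, pv_add_of_mem _ _ (List.mem_filter.mpr ⟨hx, hpx⟩)]
    · rw [if_neg hpx]
  · rw [pv_add_of_not_mem s x hx, List.filter_append]
    by_cases hpx : p x
    · rw [if_pos hpx, pv_add_of_not_mem _ _ (fun hmem => hx (List.mem_filter.mp hmem).1)]
      simp [hpx]
    · rw [if_neg hpx]
      simp [hpx]

-- dedup commutes with filter (accumulator-generalised)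
theorem pv_foldl_add_filter {α : Type} [BEq α] [LawfulBEq α] (p : α → Bool) (l : List α) :
    ∀ s : PySem.Set α, List.foldl PySem.Set.add (s.filter p) (l.filter p)
      = (List.foldl PySem.Set.add s l).filter p := by
  induction l with
  | nil => intro s; simp
  | cons x l ih =>
    intro s
    by_cases hpx : p x
    · rw [List.filter_cons_of_pos hpx]
      simp only [List.foldl_cons]
      rw [show PySem.Set.add (s.filter p) x = (PySem.Set.add s x).filter p by
        rw [pv_filter_add p s x, if_pos hpx]]
      exact ih (PySem.Set.add s x)
    · rw [List.filter_cons_of_neg hpx]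
      simp only [List.foldl_cons]
      rw [show s.filter p = (PySem.Set.add s x).filter p by
        rw [pv_filter_add p s x, if_neg hpx]]
      exact ih (PySem.Set.add s x)

theorem pv_ofList_filter {α : Type} [BEq α] [LawfulBEq α] (p : α → Bool) (l : List α) :
    PySem.Set.ofList (l.filter p) = (PySem.Set.ofList l).filter p := by
  have h := pv_foldl_add_filter p l []
  simpa [PySem.Set.ofList, PySem.Set.empty] using h

-- Counter of a length-filtered list = length-filter of the global Counter's items
theorem pv_counter_filter (c : Int) (palabras : List String) :
    (PySem.Dict.counter (palabras.filter (fun w => PySem.Str.len w == c))).items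
    = (PySem.Dict.counter palabras).items.filter (fun q => PySem.Str.len q.1 == c) := by
  rw [PySem.Dict.items_counter, PySem.Dict.items_counter, pv_ofList_filter, List.filter_map]
  apply List.map_congr_left
  intro k hk
  have hkc : (PySem.Str.len k == c) = true := (List.mem_filter.mp hk).2
  have hcnt : List.count k (List.filter (fun x => PySem.Str.len x == c) palabras)
      = List.count k palabras := List.count_filter (l := palabras) hkc
  rw [hcnt]

-- Python's tuple key (-freq, word) is the lexicographic order on Int × String
theorem pv_sorted2_eq_sorted {α : Type} (xs : List α) (k1 : α → Int) (k2 : α → String) :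
    PySem.List.sorted2 xs k1 k2 = PySem.List.sorted xs (fun x => toLex (k1 x, k2 x)) := by
  have hfun : (fun a b => decide (k1 a < k1 b) || (!decide (k1 b < k1 a) && decide (k2 a < k2 b)))
      = (fun a b => decide ((fun x => toLex (k1 x, k2 x)) a < (fun x => toLex (k1 x, k2 x)) b)) := by
    funext a b
    have hiff : (toLex (k1 a, k2 a) < toLex (k1 b, k2 b))
        ↔ (k1 a < k1 b ∨ (¬ k1 b < k1 a ∧ k2 a < k2 b)) := by
      rw [Prod.Lex.lt_iff]
      simp only [ofLex_toLex]
      constructor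
      · rintro (h | ⟨heq, h2⟩)
        · exact Or.inl h
        · exact Or.inr ⟨by omega, h2⟩
      · rintro (h | ⟨hnot, h2⟩)
        · exact Or.inl h
        · by_cases h1 : k1 a < k1 b
          · exact Or.inl h1
          · exact Or.inr ⟨by omega, h2⟩
    rw [show (decide (toLex (k1 a, k2 a) < toLex (k1 b, k2 b)))
        = decide (k1 a < k1 b ∨ (¬ k1 b < k1 a ∧ k2 a < k2 b)) from decide_eq_decide.mpr hiff]
    by_cases h1 : k1 a < k1 b <;> by_cases h2 : k1 b < k1 a <;> by_cases h3 : k2 a < k2 b <;>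
      simp [h1, h2, h3]
  simp only [PySem.List.sorted2, PySem.List.sorted, if_neg (by decide : ¬ (false = true))]
  rw [hfun]

-- a filter of a stable sort with pairwise-distinct keys is the sort of the filter
theorem pv_sorted_filter {α κ : Type} [LinearOrder κ] (xs : List α) (key : α → κ) (p : α → Bool)
    (hne : xs.Pairwise (fun a b => key a ≠ key b)) :
    (PySem.List.sorted xs key).filter p = PySem.List.sorted (xs.filter p) key := by
  have hperm : ((PySem.List.sorted xs key).filter p).Perm (xs.filter p) :=
    (PySem.List.sorted_perm xs key false).filter p
  have hne' : (PySem.List.sorted xs key).Pairwise (fun a b => key a ≠ key b) :=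
    ((PySem.List.sorted_perm xs key false).pairwise_iff
      (fun h => Ne.symm h)).mpr hne
  have hlt : (PySem.List.sorted xs key).Pairwise (fun a b => key a < key b) :=
    ((PySem.List.sorted_pairwise xs key).and hne').imp
      (fun ⟨hle, hne⟩ => lt_of_le_of_ne hle hne)
  exact (PySem.List.sorted_eq_of_perm_of_pairwise_lt (xs.filter p)
    ((PySem.List.sorted xs key).filter p) key hperm (hlt.filter p)).symm

-- B's dict comprehension {len(p): [] for p in palabras} maps everything to []
theorem pv_getD_insert_nil (ps : List String) :
    ∀ (d : PySem.Dict Int (List (String × Int))) (c : Int), d.getD c [] = [] →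
    (ps.foldl (fun d p => d.insert (PySem.Str.len p) ([] : List (String × Int))) d).getD c [] = [] := by
  induction ps with
  | nil => intro d c h; simpa using h
  | cons p ps ih =>
    intro d c h
    simp only [List.foldl_cons]
    exact ih _ c (by rw [PySem.Dict.getD_insert]; split_ifs <;> simp [h])

-- items of B's distribution fold
theorem pv_distribute_items (l : List (String × Int)) (palabras : List String)
    (hsub : ∀ q ∈ l, q.1 ∈ palabras) :
    ((l.foldl (fun d par => d.modify (PySem.Str.len par.1) [] (fun g => g ++ [par]))
        (palabras.foldl (fun d p => d.insert (PySem.Str.len p) ([] : List (String × Int)))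
          (PySem.Dict.mk [])))).items
    = (PySem.Set.ofList (palabras.map PySem.Str.len)).map
        (fun c => (c, l.filter (fun q => PySem.Str.len q.1 == c))) := by
  have hkeys0 : (palabras.foldl (fun d p => d.insert (PySem.Str.len p) ([] : List (String × Int)))
      (PySem.Dict.mk [])).keys = PySem.Set.ofList (palabras.map PySem.Str.len) := by
    have h := PySem.Dict.keys_foldl_insert_key palabras PySem.Str.len
      (fun _ _ => ([] : List (String × Int))) (PySem.Dict.mk [])
    simpa [PySem.Dict.keys, PySem.Set.update, PySem.Set.ofList, PySem.Set.empty] using h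
  have hkeys : ((l.foldl (fun d par => d.modify (PySem.Str.len par.1) [] (fun g => g ++ [par]))
      (palabras.foldl (fun d p => d.insert (PySem.Str.len p) ([] : List (String × Int)))
        (PySem.Dict.mk [])))).keys = PySem.Set.ofList (palabras.map PySem.Str.len) := by
    have h := PySem.Dict.keys_foldl_modify_key l (fun par => PySem.Str.len par.1)
      ([] : List (String × Int)) (fun _ par => fun g => g ++ [par])
      (palabras.foldl (fun d p => d.insert (PySem.Str.len p) ([] : List (String × Int)))
        (PySem.Dict.mk []))
    rw [h, hkeys0, PySem.Set.update_eq_append_filter]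
    have : List.filter (fun y => !(PySem.Set.ofList (palabras.map PySem.Str.len)).contains y)
        (PySem.Set.ofList (l.map (fun par => PySem.Str.len par.1))) = [] := by
      rw [List.filter_eq_nil_iff]
      intro y hy
      have hy' : y ∈ l.map (fun par => PySem.Str.len par.1) := (PySem.Set.mem_ofList _ _).mp hy
      obtain ⟨q, hq, rfl⟩ := List.mem_map.mp hy'
      have : PySem.Str.len q.1 ∈ palabras.map PySem.Str.len :=
        List.mem_map.mpr ⟨q.1, hsub q hq, rfl⟩
      simp only [(PySem.Set.contains_iff _ _).mpr ((PySem.Set.mem_ofList _ _).mpr this),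
        Bool.not_true]
      simp
    rw [this, List.append_nil]
  have hnodup : ((l.foldl (fun d par => d.modify (PySem.Str.len par.1) [] (fun g => g ++ [par]))
      (palabras.foldl (fun d p => d.insert (PySem.Str.len p) ([] : List (String × Int)))
        (PySem.Dict.mk [])))).keys.Nodup := by
    rw [hkeys]; exact PySem.Set.nodup_ofList _
  rw [PySem.Dict.items_eq_map_keys _ hnodup [], hkeys]
  apply List.map_congr_left
  intro c _
  have h1 : (l.foldl (fun d par => d.modify (PySem.Str.len par.1) [] (fun g => g ++ [par]))
      (palabras.foldl (fun d p => d.insert (PySem.Str.len p) ([] : List (String × Int)))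
        (PySem.Dict.mk [])))
      = ((l.map (fun par => (PySem.Str.len par.1, par))).foldl
          (fun d q => d.modify q.1 [] (fun g => g ++ [q.2]))
          (palabras.foldl (fun d p => d.insert (PySem.Str.len p) ([] : List (String × Int)))
            (PySem.Dict.mk []))) := by
    rw [List.foldl_map]
  rw [h1, PySem.Dict.getD_foldl_modify_append,
    pv_getD_insert_nil palabras _ c (by simp [PySem.Dict.getD, PySem.Dict.get?])]
  simp [List.filter_map, Function.comp_def]

-- ===== VERDICT (by name: the statement is the Claim_ definition above) =====
theorem agrupar_y_ordenar_palabras_spec : Claim_equal_agrupar_y_ordenar_palabras := by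
  intro palabras _
  unfold Spec_agrupar_y_ordenar_palabras
  unfold agrupar_y_ordenar_palabras agrupar_y_ordenar_palabras_alt
  rw [pv_groupby_items palabras PySem.Str.len (fun w => w),
    pv_distribute_items _ palabras (by
      intro q hq
      have hmem : q ∈ (PySem.Dict.counter palabras).items :=
        (PySem.List.sorted2_perm _ _ _ _).mem_iff.mp hq
      rw [PySem.Dict.items_counter] at hmem
      obtain ⟨k, hk, rfl⟩ := List.mem_map.mp hmem
      exact (PySem.Set.mem_ofList _ _).mp hk)]
  rw [List.map_map]
  apply List.map_congr_left
  intro c hc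
  simp only [Function.comp_def, Prod.mk.injEq, true_and]
  have hne : ((PySem.Dict.counter palabras).items).Pairwise
      (fun a b => (fun q : String × Int => toLex (-q.2, q.1)) a ≠ (fun q : String × Int => toLex (-q.2, q.1)) b) := by
    rw [PySem.Dict.items_counter]
    have hnd : (PySem.Set.ofList palabras).Nodup := PySem.Set.nodup_ofList _
    rw [List.pairwise_map]
    exact hnd.imp (fun hxy h => hxy (by
      have := congrArg (fun z => (ofLex z).2) h
      simpa using this))
  have hmapid : ((palabras.filter (fun x => PySem.Str.len x == c)).map (fun w => w))
      = palabras.filter (fun x => PySem.Str.len x == c) := List.map_id' _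
  rw [hmapid, pv_sorted2_eq_sorted, pv_sorted2_eq_sorted, pv_counter_filter,
    ← pv_sorted_filter _ _ _ hne]
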